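-- pv_equiv track=rewrite | github.com/jerodway/open-semantic-search | clean_out_files.py | mapping_reverse
-- ===== SOURCE A (Python) =====
-- def mapping_reverse(value, mappings=None):
--     if mappings is None:
--         mappings = {}
--
--     max_match_len = -1
--
--     # check all mappings for matching and use the best
--     for map_from, map_to in mappings.items():
--
--         # map from matching value?
--         if value.startswith(map_to):
--
--             # if from string longer (deeper path), this is the better matching
--             match_len = len(map_to)
--
--             if match_len > max_match_len:
--                 max_match_len = match_len
--                 best_match_map_from = map_from
--                 best_match_map_to = map_to
--
--     # if there is a match, replace first occurance of value with reverse mapping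
--     if max_match_len >= 0:
--         value = value.replace(best_match_map_to, best_match_map_from, 1)
--
--     return value
-- ===== SOURCE B (Python) =====
-- def mapping_reverse(value, mappings=None):
--     if mappings is None:
--         mappings = {}
--
--     # reverse lookup table: map_to -> map_from, first map_from wins per map_to
--     lookup = {}
--     for map_from, map_to in mappings.items():
--         lookup.setdefault(map_to, map_from)
--
--     # probe prefixes of value, longest first; no prefix longer than the longest
--     # map_to (or than value itself) can match, so start there
--     longest = max((len(map_to) for map_to in mappings.values()), default=-1)
--     for length in range(min(len(value), longest), -1, -1):
--         map_from = lookup.get(value[:length])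
--         if map_from is not None:
--             return map_from + value[length:]
--
--     return value
-- ===== Notes on version B (the rewrite author's own statement) =====
-- stated objective: alternative
-- what changed: Instead of scanning every mapping and keeping the longest map_to that prefixes value, B builds a reverse lookup table map_to -> first map_from once and probes prefixes of value, longest first (capped by the longest map_to), returning map_from + value[length:] on the first hit.
import Mathlib
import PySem

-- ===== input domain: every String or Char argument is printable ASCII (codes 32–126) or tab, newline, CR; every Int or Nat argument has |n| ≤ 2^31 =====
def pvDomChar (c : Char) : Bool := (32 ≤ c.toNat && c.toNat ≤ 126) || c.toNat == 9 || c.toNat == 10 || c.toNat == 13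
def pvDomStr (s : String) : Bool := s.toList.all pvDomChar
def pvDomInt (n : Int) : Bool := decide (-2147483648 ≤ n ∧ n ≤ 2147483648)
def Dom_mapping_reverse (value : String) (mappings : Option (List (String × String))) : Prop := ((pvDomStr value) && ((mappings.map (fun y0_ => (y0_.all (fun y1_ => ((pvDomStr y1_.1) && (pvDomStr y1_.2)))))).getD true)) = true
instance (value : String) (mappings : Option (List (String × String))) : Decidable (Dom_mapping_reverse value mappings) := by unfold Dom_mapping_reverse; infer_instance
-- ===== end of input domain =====

-- B replaces A's scan over all mappings by a reverse lookup table probed with prefixes of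
-- value, longest first (a different decomposition; not claimed faster).


-- ===== PORT A =====
-- value.replace(old, new, 1) ported by hand (PySem.Str.replace has no count): splice `new`
-- over the FIRST occurrence of `old` (absent → unchanged; old = "" inserts at the front) —
-- exact for Python's count=1 replace.
def pyReplace1 (s old new : String) : String :=
  if PySem.Chars.find s.toList old.toList < 0 then s
  else String.ofList (s.toList.take (PySem.Chars.find s.toList old.toList).toNat
        ++ new.toList
        ++ s.toList.drop ((PySem.Chars.find s.toList old.toList).toNat + old.toList.length))

-- A's loop body: keep (max_match_len, best pair); the option is none exactly while
-- max_match_len is still -1 and the best_match_* variables are unassigned.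
def mrStep (value : String) (s : Int × Option (String × String)) (p : String × String) :
    Int × Option (String × String) :=
  if PySem.Str.startswith value p.2 then
    let matchLen := PySem.Str.len p.2
    if matchLen > s.1 then (matchLen, some p) else s
  else s

-- A's epilogue: if max_match_len >= 0, replace the first occurrence of best_match_map_to
def mrFinish (value : String) (st : Int × Option (String × String)) : String :=
  if st.1 ≥ 0 then
    match st.2 with
    | some p => pyReplace1 value p.2 p.1
    | none => value
  else value

def mapping_reverse (value : String) (mappings : Option (List (String × String))) : String :=
  mrFinish value
    ((PySem.Dict.ofList (mappings.getD [])).items.foldl (mrStep value) (-1, none))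

-- ===== PORT B =====
-- lookup = {}; for map_from, map_to in mappings.items(): lookup.setdefault(map_to, map_from)
def mrLookup (items : List (String × String)) : PySem.Dict String String :=
  items.foldl (fun d p => d.setdefault p.2 p.1) PySem.Dict.empty

-- for length in range(len(value), -1, -1): probe value[:length] in lookup
def mrProbe (value : String) (lookup : PySem.Dict String String) : Nat → String
  | 0 =>
    match lookup.get? (String.ofList (value.toList.take 0)) with
    | some f => String.ofList (f.toList ++ value.toList.drop 0)
    | none => value
  | n + 1 =>
    match lookup.get? (String.ofList (value.toList.take (n + 1))) with
    | some f => String.ofList (f.toList ++ value.toList.drop (n + 1))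
    | none => mrProbe value lookup n

-- longest = max((len(map_to) for map_to in mappings.values()), default=-1)
def mrLongest (items : List (String × String)) : Int :=
  items.foldl (fun (a : Int) p => max a (PySem.Str.len p.2)) (-1)

-- range(min(len(value), longest), -1, -1) is empty iff the start is negative
def mapping_reverse_alt (value : String) (mappings : Option (List (String × String))) : String :=
  let items := (PySem.Dict.ofList (mappings.getD [])).items
  let start := min (PySem.Str.len value) (mrLongest items)
  if start < 0 then value else mrProbe value (mrLookup items) start.toNat

-- ===== PRECONDITION & SPEC =====
def Spec_mapping_reverse (value : String) (mappings : Option (List (String × String))) (out : String) : Prop := out = mapping_reverse_alt value mappings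
instance (value : String) (mappings : Option (List (String × String))) (out : String) : Decidable (Spec_mapping_reverse value mappings out) := by unfold Spec_mapping_reverse; infer_instance

-- ===== CLAIM (what is proved, stated in full; the proofs are below) =====
def Claim_equal_mapping_reverse : Prop := ∀ (value : String) (mappings : Option (List (String × String))), Dom_mapping_reverse value mappings → Spec_mapping_reverse value mappings (mapping_reverse value mappings)

-- ===== LEMMAS AND PROOFS =====

-- (a == ofList xs) on String equals the list comparison
theorem mrBeq_ofList (a : String) (xs : List Char) :
    (a == String.ofList xs) = (a.toList == xs) := by
  by_cases h : a = String.ofList xs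
  · subst h; simp
  · have hx : a.toList ≠ xs := fun hx => h (by rw [← hx, String.ofList_toList])
    simp [h, hx]

-- find of a prefix is 0
theorem mrFind_prefix (cs sub : List Char) (h : sub <+: cs) : PySem.Chars.find cs sub = 0 := by
  have h0 : 0 ≤ PySem.Chars.find cs sub := (PySem.Chars.find_nonneg_iff cs sub).2 h.isInfix
  by_contra hne
  exact (PySem.Chars.find_spec h0).2 0 (by omega) h

-- the setdefault loop keeps the first map_from per map_to
theorem mrGet?_fold (l : List (String × String)) :
    ∀ (d : PySem.Dict String String) (k : String),
      (l.foldl (fun d p => d.setdefault p.2 p.1) d).get? k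
        = (d.get? k).or ((l.find? (fun p => p.2 == k)).map (·.1)) := by
  induction l with
  | nil => intro d k; simp
  | cons p t ih =>
    intro d k
    simp only [List.foldl_cons, List.find?_cons, ih]
    by_cases hk : p.2 = k
    · subst hk
      rw [PySem.Dict.get?_setdefault_self]
      cases d.get? p.2 <;> simp
    · rw [PySem.Dict.get?_setdefault_of_ne _ _ (Ne.symm hk)]
      simp [show (p.2 == k) = false by simpa using hk]

theorem mrGet?_lookup (l : List (String × String)) (k : String) :
    (mrLookup l).get? k = (l.find? (fun p => p.2 == k)).map (·.1) := by
  simp [mrLookup, mrGet?_fold]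

-- the (first) mapping pair whose map_to equals value[:n]
def mrHit (cs : List Char) (l : List (String × String)) (n : Nat) : Option (String × String) :=
  l.find? (fun p => p.2 == String.ofList (cs.take n))

theorem mrHit_eq_none_of_bound (cs : List Char) (l : List (String × String)) (k n : Nat)
    (hb : ∀ p ∈ l, PySem.Chars.startswith cs p.2.toList = true → p.2.toList.length ≤ k)
    (hk : k < n) (hn : n ≤ cs.length) : mrHit cs l n = none := by
  rw [mrHit, List.find?_eq_none]
  intro p hp
  rw [mrBeq_ofList]
  simp only [beq_iff_eq]
  intro he
  have hpre : p.2.toList <+: cs := he ▸ List.take_prefix n cs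
  have hlen : p.2.toList.length = n := by
    rw [he, List.length_take]; omega
  have := hb p hp ((PySem.Chars.startswith_iff cs p.2.toList).2 hpre)
  omega

theorem mrHit_eq_none_of_nopred (cs : List Char) (l : List (String × String)) (n : Nat)
    (hb : ∀ p ∈ l, PySem.Chars.startswith cs p.2.toList = false) :
    mrHit cs l n = none := by
  rw [mrHit, List.find?_eq_none]
  intro p hp
  rw [mrBeq_ofList]
  simp only [beq_iff_eq]
  intro he
  have hpre : p.2.toList <+: cs := he ▸ List.take_prefix n cs
  have h2 := hb p hp
  rw [(PySem.Chars.startswith_iff cs p.2.toList).2 hpre] at h2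
  exact absurd h2 (by simp)

-- invariant characterising A's fold
def mrInv (value : String) (l : List (String × String))
    (s : Int × Option (String × String)) : Prop :=
  (s = (-1, none) ∧ ∀ p ∈ l, PySem.Chars.startswith value.toList p.2.toList = false)
  ∨ (∃ (k : Nat) (q : String × String), k ≤ value.toList.length ∧ s = ((k : Int), some q)
      ∧ mrHit value.toList l k = some q ∧ q.2.toList = value.toList.take k
      ∧ ∀ p ∈ l, PySem.Chars.startswith value.toList p.2.toList = true → p.2.toList.length ≤ k)

theorem mrInv_fold (value : String) (l : List (String × String)) :
    mrInv value l (l.foldl (mrStep value) (-1, none)) := by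
  induction l using List.reverseRecOn with
  | nil => exact Or.inl ⟨rfl, by simp⟩
  | append_singleton t p ih =>
    rw [List.foldl_append, List.foldl_cons, List.foldl_nil]
    set s := t.foldl (mrStep value) (-1, none) with hs
    have hLL : p.2.toList.length = p.2.length := String.length_toList
    by_cases hpre : PySem.Chars.startswith value.toList p.2.toList = true
    · -- p.2 is a prefix of value
      have hpre' : p.2.toList <+: value.toList :=
        (PySem.Chars.startswith_iff _ _).1 hpre
      have htake : p.2.toList = value.toList.take p.2.toList.length :=
        List.prefix_iff_eq_take.1 hpre'
      have hlenle : p.2.toList.length ≤ value.toList.length := hpre'.length_le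
      have hpred : (p.2 == String.ofList (value.toList.take p.2.toList.length)) = true := by
        rw [mrBeq_ofList, ← htake]; simp
      rcases ih with ⟨h1, h2⟩ | ⟨k, q, hk, h1, hhit, hq, hb⟩
      · -- no previous match: this one is taken
        rw [h1]
        right
        refine ⟨p.2.toList.length, p, hlenle, ?_, ?_, htake, ?_⟩
        · simp [mrStep, PySem.Str.startswith_eq, hpre, PySem.Str.len_eq]
          omega
        · rw [mrHit, List.find?_append]
          have hnone : mrHit value.toList t p.2.toList.length = none :=
            mrHit_eq_none_of_nopred _ _ _ h2
          rw [mrHit] at hnone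
          rw [hnone, Option.none_or]
          simp only [List.find?, hpred]
        · intro p' hp' hpp'
          rcases List.mem_append.1 hp' with h | h
          · exact absurd (h2 p' h) (by simp [hpp'])
          · simp only [List.mem_singleton] at h; subst h; exact le_refl _
      · by_cases hgt : k < p.2.toList.length
        · -- strictly longer: new best
          rw [h1]
          right
          refine ⟨p.2.toList.length, p, hlenle, ?_, ?_, htake, ?_⟩
          · simp [mrStep, PySem.Str.startswith_eq, hpre, PySem.Str.len_eq]
            omega
          · rw [mrHit, List.find?_append]
            have hnone : mrHit value.toList t p.2.toList.length = none :=
              mrHit_eq_none_of_bound _ _ k _ hb hgt hlenle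
            rw [mrHit] at hnone
            rw [hnone, Option.none_or]
            simp only [List.find?, hpred]
          · intro p' hp' hpp'
            rcases List.mem_append.1 hp' with h | h
            · exact le_trans (hb p' h hpp') (le_of_lt hgt)
            · simp only [List.mem_singleton] at h; subst h; exact le_refl _
        · -- not longer: state unchanged
          rw [h1]
          right
          refine ⟨k, q, hk, ?_, ?_, hq, ?_⟩
          · simp [mrStep, PySem.Str.startswith_eq, hpre, PySem.Str.len_eq]
            omega
          · rw [mrHit, List.find?_append]
            rw [mrHit] at hhit
            rw [hhit]; rfl
          · intro p' hp' hpp'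
            rcases List.mem_append.1 hp' with h | h
            · exact hb p' h hpp'
            · simp only [List.mem_singleton] at h; subst h; omega
    · -- p.2 not a prefix: state unchanged
      have hstep : mrStep value s p = s := by
        simp [mrStep, PySem.Str.startswith_eq, hpre]
      rw [hstep]
      rcases ih with ⟨h1, h2⟩ | ⟨k, q, hk, h1, hhit, hq, hb⟩
      · left
        refine ⟨h1, fun p' hp' => ?_⟩
        rcases List.mem_append.1 hp' with h | h
        · exact h2 p' h
        · simp only [List.mem_singleton] at h; subst h
          simpa using hpre
      · right
        refine ⟨k, q, hk, h1, ?_, hq, ?_⟩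
        · rw [mrHit, List.find?_append]
          rw [mrHit] at hhit
          rw [hhit]; rfl
        · intro p' hp' hpp'
          rcases List.mem_append.1 hp' with h | h
          · exact hb p' h hpp'
          · simp only [List.mem_singleton] at h; subst h
            exact absurd hpp' (by simpa using hpre)

-- B's probe: a direct hit
theorem mrProbe_hit (value : String) (lookup : PySem.Dict String String) (n : Nat)
    (f : String) (h : lookup.get? (String.ofList (value.toList.take n)) = some f) :
    mrProbe value lookup n = String.ofList (f.toList ++ value.toList.drop n) := by
  cases n <;> simp only [mrProbe, h]

-- B's probe skips missing levels
theorem mrProbe_stable (value : String) (lookup : PySem.Dict String String) (k : Nat) :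
    ∀ n, k ≤ n →
      (∀ m, k < m → m ≤ n → lookup.get? (String.ofList (value.toList.take m)) = none) →
      mrProbe value lookup n = mrProbe value lookup k := by
  intro n
  induction n with
  | zero =>
    intro hk _
    have : k = 0 := Nat.le_zero.mp hk
    rw [this]
  | succ n ih =>
    intro hk hnone
    by_cases he : k = n + 1
    · rw [he]
    · have hk' : k ≤ n := by omega
      have h1 : lookup.get? (String.ofList (value.toList.take (n + 1))) = none :=
        hnone (n + 1) (by omega) (le_refl _)
      rw [show mrProbe value lookup (n + 1) = mrProbe value lookup n by
        simp only [mrProbe, h1]]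
      exact ih hk' (fun m hm1 hm2 => hnone m hm1 (by omega))

theorem mrProbe_none_all (value : String) (lookup : PySem.Dict String String) :
    ∀ n, (∀ m, m ≤ n → lookup.get? (String.ofList (value.toList.take m)) = none) →
      mrProbe value lookup n = value := by
  intro n
  induction n with
  | zero =>
    intro h
    simp only [mrProbe, h 0 (le_refl 0)]
  | succ n ih =>
    intro h
    rw [show mrProbe value lookup (n + 1) = mrProbe value lookup n by
      simp only [mrProbe, h (n + 1) (le_refl _)]]
    exact ih (fun m hm => h m (by omega))

-- the heart of the equivalence, over an arbitrary items list
theorem mrMain (value : String) (l : List (String × String)) :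
    mrFinish value (l.foldl (mrStep value) (-1, none))
      = (if min (PySem.Str.len value) (mrLongest l) < 0 then value
         else mrProbe value (mrLookup l) (min (PySem.Str.len value) (mrLongest l)).toNat) := by
  rcases mrInv_fold value l with ⟨h1, h2⟩ | ⟨k, q, hk, h1, hhit, hq, hb⟩
  · -- no match: both return value
    rw [h1]
    have hF : mrFinish value (-1, none) = value := by norm_num [mrFinish]
    rw [hF]
    split
    · rfl
    symm
    apply mrProbe_none_all
    intro m _
    rw [mrGet?_lookup]
    have hnone : mrHit value.toList l m = none := mrHit_eq_none_of_nopred _ _ _ h2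
    rw [mrHit] at hnone
    rw [hnone]; rfl
  · -- match of length k by pair q
    rw [h1]
    -- q is one of the mappings, so k is bounded by the longest map_to and by len(value)
    have hqmem : q ∈ l := List.mem_of_find?_eq_some hhit
    have hqlen' : q.2.toList.length = k := by
      have := (List.find?_eq_some_iff_append.mp hhit).1
      rw [mrBeq_ofList] at this
      simp only [beq_iff_eq] at this
      rw [this, List.length_take]; omega
    have hlong : (k : Int) ≤ mrLongest l := by
      have h := (PySem.List.le_foldl_max_int l (fun p => PySem.Str.len p.2) (-1)).2 q hqmem
      rw [mrLongest]
      simp only [PySem.Str.len_eq, hqlen'] at h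
      exact h
    have hstart : ¬ min (PySem.Str.len value) (mrLongest l) < 0 := by
      rw [PySem.Str.len_eq]
      omega
    rw [if_neg hstart]
    have hstart1 : k ≤ (min (PySem.Str.len value) (mrLongest l)).toNat := by
      rw [PySem.Str.len_eq]
      omega
    have hstart2 : (min (PySem.Str.len value) (mrLongest l)).toNat ≤ value.toList.length := by
      rw [PySem.Str.len_eq]
      omega
    have hF : mrFinish value ((k : Int), some q) = pyReplace1 value q.2 q.1 := by
      simp [mrFinish]
    rw [hF]
    have hqlen : q.2.toList.length = k := by
      rw [hq, List.length_take]; omega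
    have hqpre : q.2.toList <+: value.toList := hq ▸ List.take_prefix k value.toList
    have hfind : PySem.Chars.find value.toList q.2.toList = 0 := mrFind_prefix _ _ hqpre
    have hA : pyReplace1 value q.2 q.1
        = String.ofList (q.1.toList ++ value.toList.drop k) := by
      simp [pyReplace1, hfind, hqlen]
    rw [hA]
    have hnone : ∀ m, k < m → m ≤ value.toList.length →
        (mrLookup l).get? (String.ofList (value.toList.take m)) = none := by
      intro m hm1 hm2
      rw [mrGet?_lookup]
      have h0 := mrHit_eq_none_of_bound value.toList l k m hb hm1 hm2
      rw [mrHit] at h0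
      rw [h0]; rfl
    rw [mrProbe_stable value _ k _ hstart1 (fun m hm1 hm2 => hnone m hm1 (le_trans hm2 hstart2))]
    have hhit' : (mrLookup l).get? (String.ofList (value.toList.take k)) = some q.1 := by
      rw [mrGet?_lookup]
      rw [mrHit] at hhit
      rw [hhit]; rfl
    rw [mrProbe_hit value _ k q.1 hhit']

-- ===== VERDICT (by name: the statement is the Claim_ definition above) =====
theorem mapping_reverse_spec : Claim_equal_mapping_reverse := by
  intro value mappings _
  exact mrMain value (PySem.Dict.ofList (mappings.getD [])).items
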